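-- pv_equiv track=rewrite | github.com/thumbe12856/competitive-programming | code-jam/2021/Round1A/3/solve.py | dfs
-- ===== SOURCE A (Python) =====
-- def dfs(idx, Q):
--     if idx == Q:
--         return [""]
--
--     res = []
--     ret = dfs(idx + 1, Q)
--     for r in ret:
--         res += ["T" + r, "F" + r]
--     return res
-- ===== SOURCE B (Python) =====
-- def dfs(idx, Q):
--     n = Q - idx
--     res = []
--     for i in range(2 ** n):
--         res.append(''.join('F' if i // 2 ** j % 2 == 1 else 'T' for j in range(n)))
--     return res
-- ===== Notes on version B (the rewrite author's own statement) =====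
-- stated objective: alternative
-- what changed: Replaces the suffix recursion with per-string prepends by a direct enumeration: iterate i over range(2**(Q-idx)) and decode each string from the bits of i (position j is 'F' iff bit j of i is 1), no recursion.
import Mathlib
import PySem

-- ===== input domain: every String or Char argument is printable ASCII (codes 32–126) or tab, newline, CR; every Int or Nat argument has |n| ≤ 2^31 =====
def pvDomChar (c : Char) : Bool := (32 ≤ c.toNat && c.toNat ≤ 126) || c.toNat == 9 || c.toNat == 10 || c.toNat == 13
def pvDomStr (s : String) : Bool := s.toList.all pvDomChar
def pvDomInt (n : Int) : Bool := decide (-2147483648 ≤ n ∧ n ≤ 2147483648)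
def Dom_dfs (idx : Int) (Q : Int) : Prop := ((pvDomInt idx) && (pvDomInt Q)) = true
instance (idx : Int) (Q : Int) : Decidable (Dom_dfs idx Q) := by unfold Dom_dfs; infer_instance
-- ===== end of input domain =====

-- B replaces A's suffix recursion by a flat loop decoding each string from the bits of its index
-- (alternative decomposition, same cost). Equivalence on idx ≤ Q; for idx > Q both Pythons raise.


-- ===== PORT A =====
-- A recurses on idx until idx == Q; we carry the remaining depth n = Q - idx as the recursion
-- fuel (n = 0 is exactly the `idx == Q` base case when idx ≤ Q, i.e. inside Pre_dfs; for
-- idx > Q the Python recursion never reaches the base case and raises RecursionError).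
def dfsA : Nat → List String
  | 0 => [""]
  | n + 1 =>
    -- res = []; ret = dfs(idx+1,Q); for r in ret: res += ["T"+r, "F"+r]; return res
    (dfsA n).foldl (fun res r => res ++ ["T" ++ r, "F" ++ r]) []

def dfs (idx : Int) (Q : Int) : List String := dfsA (Q - idx).toNat

-- ===== PORT B =====
-- 'F' if i // 2 ** j % 2 == 1 else 'T'
def dfsAltChar (i : Nat) (j : Nat) : Char := if i / 2 ^ j % 2 = 1 then 'F' else 'T'

-- n = Q - idx; for i in range(2**n): res.append(''.join(... for j in range(n)))
-- (.toNat is exact since Pre_dfs gives idx ≤ Q)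
def dfs_alt (idx : Int) (Q : Int) : List String :=
  let n := (Q - idx).toNat
  (List.range (2 ^ n)).foldl
    (fun res i => res ++ [String.ofList ((List.range n).map (dfsAltChar i))]) []

-- ===== PRECONDITION & SPEC =====
-- Pre_ excludes idx > Q, where A recurses past Q forever (RecursionError); B raises there too.
def Pre_dfs (idx : Int) (Q : Int) : Prop := idx ≤ Q
instance (idx : Int) (Q : Int) : Decidable (Pre_dfs idx Q) := by unfold Pre_dfs; infer_instance
def pvWitness_dfs : Int × Int := (0, 2)
def Spec_dfs (idx : Int) (Q : Int) (out : List String) : Prop := out = dfs_alt idx Q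
instance (idx : Int) (Q : Int) (out : List String) : Decidable (Spec_dfs idx Q out) := by unfold Spec_dfs; infer_instance

-- ===== CLAIM (what is proved, stated in full; the proofs are below) =====
def Claim_equal_dfs : Prop := ∀ (idx : Int) (Q : Int), Dom_dfs idx Q → Pre_dfs idx Q → Spec_dfs idx Q (dfs idx Q)

-- ===== LEMMAS AND PROOFS =====

theorem range_double (m : Nat) :
    List.range (2 * m) = (List.range m).flatMap (fun k => [2 * k, 2 * k + 1]) := by
  induction m with
  | zero => rfl
  | succ m ih =>
    have h : 2 * (m + 1) = (2 * m) + 1 + 1 := by ring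
    rw [h, List.range_succ, List.range_succ, List.range_succ, ih]
    simp

theorem char_even_zero (k : Nat) : dfsAltChar (2 * k) 0 = 'T' := by
  simp [dfsAltChar, Nat.mul_mod_right]

theorem char_odd_zero (k : Nat) : dfsAltChar (2 * k + 1) 0 = 'F' := by
  simp [dfsAltChar]

theorem char_shift (i j : Nat) : dfsAltChar i (j + 1) = dfsAltChar (i / 2) j := by
  have : i / 2 ^ (j + 1) = i / 2 / 2 ^ j := by
    rw [Nat.div_div_eq_div_mul, pow_succ, mul_comm]
  simp [dfsAltChar, this]

theorem row_even (n k : Nat) :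
    (List.range (n + 1)).map (dfsAltChar (2 * k)) = 'T' :: (List.range n).map (dfsAltChar k) := by
  rw [List.range_succ_eq_map, List.map_cons, List.map_map, char_even_zero]
  congr 1
  refine List.map_congr_left fun j _ => ?_
  show dfsAltChar (2 * k) (j + 1) = dfsAltChar k j
  rw [char_shift]
  congr 1
  omega

theorem row_odd (n k : Nat) :
    (List.range (n + 1)).map (dfsAltChar (2 * k + 1)) = 'F' :: (List.range n).map (dfsAltChar k) := by
  rw [List.range_succ_eq_map, List.map_cons, List.map_map, char_odd_zero]
  congr 1
  refine List.map_congr_left fun j _ => ?_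
  show dfsAltChar (2 * k + 1) (j + 1) = dfsAltChar k j
  rw [char_shift]
  congr 1
  omega

theorem dfsA_eq (n : Nat) :
    dfsA n = (List.range (2 ^ n)).map
      (fun i => String.ofList ((List.range n).map (dfsAltChar i))) := by
  induction n with
  | zero => rfl
  | succ n ih =>
    rw [dfsA, PySem.List.foldl_append_eq_flatMap, List.nil_append, ih,
        List.flatMap_map, pow_succ, mul_comm, range_double, List.map_flatMap]
    refine List.flatMap_congr fun k _ => ?_
    simp only [List.map_cons, List.map_nil, row_even, row_odd]
    have hT : ("T" : String) ++ String.ofList ((List.range n).map (dfsAltChar k))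
        = String.ofList ('T' :: (List.range n).map (dfsAltChar k)) := by
      rw [show ("T" : String) = String.ofList ['T'] from rfl, ← String.ofList_append]
      rfl
    have hF : ("F" : String) ++ String.ofList ((List.range n).map (dfsAltChar k))
        = String.ofList ('F' :: (List.range n).map (dfsAltChar k)) := by
      rw [show ("F" : String) = String.ofList ['F'] from rfl, ← String.ofList_append]
      rfl
    rw [hT, hF]

-- ===== VERDICT (by name: the statement is the Claim_ definition above) =====
theorem dfs_spec : Claim_equal_dfs := by
  intro idx Q _ _
  unfold Spec_dfs dfs dfs_alt
  rw [PySem.List.foldl_append_singleton_eq_map, List.nil_append, dfsA_eq]
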